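-- pv_equiv track=rewrite | github.com/einhalv/ocparse | ocparse.py | nibble_sep
-- ===== SOURCE A (Python) =====
-- def strip_sep(s: str, seps=(' ', '_', '|')) -> str:
--     """remove separator characters from string
--
--     """
--     return ''.join(c for c in s if c not in seps)
--
-- def nibble_sep(s: str, sep='_', seps=(' ', '_', '|')) -> str:
--     """ remove all separator characters and insert new separator for
--         each nibble
--
--     """
--     s = strip_sep(s, seps=seps)
--     sn = ''
--     n = 0
--     m = 0
--     ls = len(s)
--     for c in s[::-1]:
--         sn = c + sn
--         n += 1
--         m += 1
--         if n == 4 and m != ls: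
--             n = 0
--             sn = sep + sn
--     return sn
-- ===== SOURCE B (Python) =====
-- def _chunks4(t):
--     if len(t) <= 4:
--         return [t]
--     return _chunks4(t[:-4]) + [t[-4:]]
--
-- def nibble_sep(s: str, sep='_', seps=(' ', '_', '|')) -> str:
--     t = ''.join(c for c in s if c not in seps)
--     return sep.join(_chunks4(t))
-- ===== Notes on version B (the rewrite author's own statement) =====
-- stated objective: simpler
-- what changed: Replaced the char-by-char reverse loop with n/m counters and a string prepend per character by a recursive split of the stripped string into 4-char slices from the right, joined with sep.
import Mathlib
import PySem

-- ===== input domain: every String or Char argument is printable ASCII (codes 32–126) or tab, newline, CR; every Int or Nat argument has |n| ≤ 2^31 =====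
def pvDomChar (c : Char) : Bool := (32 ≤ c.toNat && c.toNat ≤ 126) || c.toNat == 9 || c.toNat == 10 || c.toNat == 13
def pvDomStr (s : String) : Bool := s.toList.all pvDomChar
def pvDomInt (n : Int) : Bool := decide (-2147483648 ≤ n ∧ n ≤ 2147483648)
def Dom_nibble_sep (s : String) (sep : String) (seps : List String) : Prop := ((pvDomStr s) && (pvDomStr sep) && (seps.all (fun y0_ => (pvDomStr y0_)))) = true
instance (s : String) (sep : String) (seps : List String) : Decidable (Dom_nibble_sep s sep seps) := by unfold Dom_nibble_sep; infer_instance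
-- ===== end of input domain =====

-- B replaces A's counter-driven reverse loop by recursive 4-char slicing from the right, joined with sep (objective: simpler).

-- ===== PORT A =====
-- strip_sep: ''.join(c for c in s if c not in seps)
def stripSepA (s : String) (seps : List String) : List Char :=
  s.toList.filter (fun c => !(seps.contains (String.ofList [c])))

-- one iteration of A's loop body; state is (sn, n, m), ls fixed
def nsStep (sepl : List Char) (ls : Int) (st : List Char × Int × Int) (c : Char) :
    List Char × Int × Int :=
  let sn := c :: st.1
  let n := st.2.1 + 1
  let m := st.2.2 + 1
  if n = 4 ∧ m ≠ ls then (sepl ++ sn, 0, m) else (sn, n, m)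

def nibble_sep (s : String) (sep : String) (seps : List String) : String :=
  -- for c in s[::-1]: iterate over the reverse (PySem.List.slice?_none_none_neg_one)
  String.ofList
    ((stripSepA s seps).reverse.foldl
      (nsStep sep.toList ((stripSepA s seps).length : Int)) ([], 0, 0)).1

-- ===== PORT B =====
-- _chunks4: if len(t) <= 4: return [t]; return _chunks4(t[:-4]) + [t[-4:]]
def nsChunks (t : List Char) : List (List Char) :=
  if _h : t.length ≤ 4 then [t]
  else
    nsChunks (PySem.List.slice t none (some (-4))) ++ [PySem.List.slice t (some (-4)) none]
termination_by t.length
decreasing_by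
  rw [PySem.List.slice_to_neg_ofNat t 4 (by omega)]
  simp [List.length_take]; omega

def nibble_sep_alt (s : String) (sep : String) (seps : List String) : String :=
  String.ofList
    (PySem.Chars.join sep.toList
      (nsChunks (s.toList.filter (fun c => !(seps.contains (String.ofList [c]))))))

-- ===== PRECONDITION & SPEC =====
def Spec_nibble_sep (s : String) (sep : String) (seps : List String) (out : String) : Prop := out = nibble_sep_alt s sep seps
instance (s : String) (sep : String) (seps : List String) (out : String) : Decidable (Spec_nibble_sep s sep seps out) := by unfold Spec_nibble_sep; infer_instance

-- ===== CLAIM (what is proved, stated in full; the proofs are below) =====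
def Claim_equal_nibble_sep : Prop := ∀ (s : String) (sep : String) (seps : List String), Dom_nibble_sep s sep seps → Spec_nibble_sep s sep seps (nibble_sep s sep seps)

-- ===== LEMMAS AND PROOFS =====

theorem nsChunks_of_le (t : List Char) (h : t.length ≤ 4) : nsChunks t = [t] := by
  rw [nsChunks]; simp [h]

theorem nsChunks_of_gt (t : List Char) (h : 4 < t.length) :
    nsChunks t = nsChunks (t.take (t.length - 4)) ++ [t.drop (t.length - 4)] := by
  rw [nsChunks]
  rw [dif_neg (by omega)]
  rw [PySem.List.slice_to_neg_ofNat t 4 (by omega), PySem.List.slice_from_neg_ofNat t 4 (by omega)]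

theorem nsChunks_ne_nil (t : List Char) : nsChunks t ≠ [] := by
  by_cases h : t.length ≤ 4
  · rw [nsChunks_of_le t h]; simp
  · rw [nsChunks_of_gt t (by omega)]; simp

theorem join_append_singleton (sep : List Char) (xs : List (List Char)) (y : List Char)
    (h : xs ≠ []) :
    PySem.Chars.join sep (xs ++ [y]) = PySem.Chars.join sep xs ++ sep ++ y := by
  induction xs with
  | nil => exact absurd rfl h
  | cons a rest ih =>
    cases rest with
    | nil => simp [PySem.Chars.join_singleton, PySem.Chars.join_cons_cons]
    | cons b r =>
      have h1 : (a :: b :: r) ++ [y] = a :: b :: (r ++ [y]) := by simp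
      rw [h1, PySem.Chars.join_cons_cons, PySem.Chars.join_cons_cons,
        ← List.cons_append, ih (by simp)]
      simp

theorem nsFold_main (sepl : List Char) (ls : Int) :
    ∀ N (r sn0 : List Char) (m0 : Int), r.length ≤ N → m0 + r.length = ls →
    (r.foldl (nsStep sepl ls) (sn0, 0, m0)).1 =
      PySem.Chars.join sepl (nsChunks r.reverse) ++ sn0 := by
  intro N
  induction N with
  | zero =>
    intro r sn0 m0 hN _
    match r, hN with
    | [], _ => simp [nsChunks_of_le, PySem.Chars.join_singleton]
    | _ :: _, h => simp at h
  | succ N ih =>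
    intro r sn0 m0 hN hm
    have hstep : ∀ x (sn : List Char) n m, nsStep sepl ls (sn, n, m) x =
        if n + 1 = 4 ∧ m + 1 ≠ ls then (sepl ++ (x :: sn), 0, m + 1)
        else (x :: sn, n + 1, m + 1) := by intro x sn n m; rfl
    by_cases h4 : 4 < r.length
    · -- peel four characters; the separator fires (m ≠ ls)
      match r, h4 with
      | a :: b :: c :: d :: rest, h4 =>
        simp only [List.length_cons] at hm h4 hN
        push_cast at hm
        have c1 : ¬((0:Int) + 1 = 4 ∧ m0 + 1 ≠ ls) := by omega
        have c2 : ¬((0:Int) + 1 + 1 = 4 ∧ m0 + 1 + 1 ≠ ls) := by omega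
        have c3 : ¬((0:Int) + 1 + 1 + 1 = 4 ∧ m0 + 1 + 1 + 1 ≠ ls) := by omega
        have c4 : ((0:Int) + 1 + 1 + 1 + 1 = 4 ∧ m0 + 1 + 1 + 1 + 1 ≠ ls) :=
          ⟨by norm_num, by omega⟩
        simp only [List.foldl_cons, hstep, if_neg c1, if_neg c2, if_neg c3, if_pos c4]
        rw [ih rest (sepl ++ (d :: c :: b :: a :: sn0)) (m0 + 1 + 1 + 1 + 1) (by omega)
          (by omega)]
        have hrev : (a :: b :: c :: d :: rest).reverse = rest.reverse ++ [d, c, b, a] := by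
          simp
        rw [hrev, nsChunks_of_gt (rest.reverse ++ [d, c, b, a]) (by simp; omega)]
        have h1 : (rest.reverse ++ [d, c, b, a]).length - 4 = rest.reverse.length := by
          simp
        rw [h1, List.take_left, List.drop_left]
        rw [join_append_singleton sepl _ _ (nsChunks_ne_nil _)]
        simp
    · -- at most four characters: the trigger never fires
      match r, h4 with
      | [], _ => simp [nsChunks_of_le, PySem.Chars.join_singleton]
      | [a], _ =>
        have c1 : ¬((0:Int) + 1 = 4 ∧ m0 + 1 ≠ ls) := by omega
        simp only [List.foldl_cons, List.foldl_nil, hstep, if_neg c1]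
        simp [nsChunks_of_le, PySem.Chars.join_singleton]
      | [a, b], _ =>
        have c1 : ¬((0:Int) + 1 = 4 ∧ m0 + 1 ≠ ls) := by omega
        have c2 : ¬((0:Int) + 1 + 1 = 4 ∧ m0 + 1 + 1 ≠ ls) := by omega
        simp only [List.foldl_cons, List.foldl_nil, hstep, if_neg c1, if_neg c2]
        simp [nsChunks_of_le, PySem.Chars.join_singleton]
      | [a, b, c], _ =>
        have c1 : ¬((0:Int) + 1 = 4 ∧ m0 + 1 ≠ ls) := by omega
        have c2 : ¬((0:Int) + 1 + 1 = 4 ∧ m0 + 1 + 1 ≠ ls) := by omega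
        have c3 : ¬((0:Int) + 1 + 1 + 1 = 4 ∧ m0 + 1 + 1 + 1 ≠ ls) := by omega
        simp only [List.foldl_cons, List.foldl_nil, hstep, if_neg c1, if_neg c2, if_neg c3]
        simp [nsChunks_of_le, PySem.Chars.join_singleton]
      | [a, b, c, d], _ =>
        simp only [List.length_cons, List.length_nil] at hm
        push_cast at hm
        have c1 : ¬((0:Int) + 1 = 4 ∧ m0 + 1 ≠ ls) := by omega
        have c2 : ¬((0:Int) + 1 + 1 = 4 ∧ m0 + 1 + 1 ≠ ls) := by omega
        have c3 : ¬((0:Int) + 1 + 1 + 1 = 4 ∧ m0 + 1 + 1 + 1 ≠ ls) := by omega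
        have c4 : ¬((0:Int) + 1 + 1 + 1 + 1 = 4 ∧ m0 + 1 + 1 + 1 + 1 ≠ ls) := by omega
        simp only [List.foldl_cons, List.foldl_nil, hstep, if_neg c1, if_neg c2, if_neg c3,
          if_neg c4]
        simp [nsChunks_of_le, PySem.Chars.join_singleton]
      | _ :: _ :: _ :: _ :: _ :: _, h5 =>
        simp only [List.length_cons] at h5
        omega

-- ===== VERDICT (by name: the statement is the Claim_ definition above) =====
theorem nibble_sep_spec : Claim_equal_nibble_sep := by
  intro s sep seps _
  unfold Spec_nibble_sep
  show nibble_sep s sep seps = nibble_sep_alt s sep seps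
  simp only [nibble_sep, nibble_sep_alt, stripSepA]
  rw [nsFold_main sep.toList _ (s.toList.filter
      (fun c => !(seps.contains (String.ofList [c])))).reverse.length _ [] 0 (le_refl _)
      (by simp)]
  simp
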